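-- pv_equiv track=rewrite | github.com/flooNetworker/DD1321 | P2/p2.py | one_uppercase
-- ===== SOURCE A (Python) =====
-- alphabeta = {'a': 'A', 'b': 'B', 'c': 'C', 'd': 'D', 'e': 'E', 'f': 'F', 'g': 'G', 'h': 'H', 'i': 'I', 'j': 'J',
--              'k': 'K', 'l': 'L', 'm': 'M', 'n': 'N', 'o': 'O', 'p': 'P', 'q': 'Q', 'r': 'R', 's': 'S', 't': 'T',
--              'u': 'U', 'v': 'V', 'w': 'W', 'x': 'X', 'y': 'Y', 'z': 'Z'}
--
-- def uppercase(letter):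
--
--     for key in alphabeta:  # will take letter and compare it to every letter in the alphabet
--         if letter == key:
--             # change to upper via the dictionary alphabeta
--             upper = alphabeta[key]
--             break
--
--         if letter == alphabeta[key]:  # if it is already uppercase
--             upper = alphabeta[key]
--             break
--
--     return upper
--
-- def one_uppercase(string):
--
--     one_upper_pwrds = []
--     pwrd = ''
--
--     num = 0
--     # go through the entire length of string, change the letter that is going to be uppercase
--     while num < len(string):
--         pwrd = ''
--         for i, x in enumerate(string):
--             if i == num:  # will change 1st, 2nd, etc letter to be uppercase
--                 v = uppercase(x)
--                 pwrd += v
--             else: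
--                 pwrd += x
--
--         one_upper_pwrds.append(pwrd)  # put new password in list
--         num += 1  # take next letter
--
--     return one_upper_pwrds
-- ===== SOURCE B (Python) =====
-- def one_uppercase(string):
--     return [string[:i] + string[i].upper() + string[i+1:] for i in range(len(string))]
-- ===== Notes on version B (the rewrite author's own statement) =====
-- stated objective: faster
-- what changed: Replaced the while loop with an inner character-by-character rebuild and a dict-scanning uppercase helper by a single list comprehension building each variant with slicing and str.upper() (constant-factor: C-level slicing/copy instead of a per-character Python loop with a 26-entry dict scan).
import Mathlib
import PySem

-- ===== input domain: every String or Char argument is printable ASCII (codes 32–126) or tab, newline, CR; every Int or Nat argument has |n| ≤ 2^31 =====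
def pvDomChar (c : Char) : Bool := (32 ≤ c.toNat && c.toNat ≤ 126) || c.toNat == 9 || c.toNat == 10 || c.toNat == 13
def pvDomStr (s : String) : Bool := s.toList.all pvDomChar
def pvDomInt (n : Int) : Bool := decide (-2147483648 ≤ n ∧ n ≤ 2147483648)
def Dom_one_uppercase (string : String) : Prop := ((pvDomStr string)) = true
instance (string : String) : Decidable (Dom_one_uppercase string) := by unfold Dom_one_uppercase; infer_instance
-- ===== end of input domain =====

-- B replaces A's while loop + inner character rebuild + dict-scanning uppercase helper by a
-- single comprehension using slicing and str.upper(); objective: simpler, same asymptotic cost.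


-- ===== PORT A =====
-- the module-level dict alphabeta, in insertion order
def alphabeta : List (Char × Char) :=
  [('a','A'),('b','B'),('c','C'),('d','D'),('e','E'),('f','F'),('g','G'),('h','H'),('i','I'),('j','J'),
   ('k','K'),('l','L'),('m','M'),('n','N'),('o','O'),('p','P'),('q','Q'),('r','R'),('s','S'),('t','T'),
   ('u','U'),('v','V'),('w','W'),('x','X'),('y','Y'),('z','Z')]

-- uppercase(letter): scan the dict; none = the UnboundLocalError path (excluded by Pre_)
def uppercaseA : Char → Option Char := fun letter => go alphabeta letter
  where go : List (Char × Char) → Char → Option Char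
    | [], _ => none
    | (k, v) :: rest, letter =>
      if letter = k then some v
      else if letter = v then some v
      else go rest letter

-- the inner 'for i, x in enumerate(string)' loop building pwrd; none propagates the exception
def pwrdGo (chars : List Char) (num i : Nat) (acc : List Char) : Option (List Char) :=
  match chars with
  | [] => some acc
  | x :: rest =>
    if i = num then
      match uppercaseA x with
      | some v => pwrdGo rest num (i + 1) (acc ++ [v])
      | none => none
    else pwrdGo rest num (i + 1) (acc ++ [x])

-- while num < len(string): build pwrd and append; the .getD "" arm is the exception path,
-- unreachable under Pre_ (there A raises UnboundLocalError)
def one_uppercase (string : String) : List String :=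
  let chars := string.toList
  (List.range chars.length).foldl
    (fun acc num => acc ++ [String.mk ((pwrdGo chars num 0 []).getD [])]) []

-- ===== PORT B =====
-- str.upper() on one ASCII char
def upperB (c : Char) : Char :=
  if 'a' ≤ c ∧ c ≤ 'z' then Char.ofNat (c.toNat - 32) else c

-- [string[:i] + string[i].upper() + string[i+1:] for i in range(len(string))]
-- (slices with these in-range nonnegative bounds are exactly take/drop)
def one_uppercase_alt (string : String) : List String :=
  let cs := string.toList
  (List.range cs.length).map
    (fun i => String.mk (cs.take i ++ [upperB (cs.getD i ' ')] ++ cs.drop (i + 1)))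

-- ===== PRECONDITION & SPEC =====
-- Pre_ excludes exactly the strings with a character outside a-zA-Z: there A's uppercase helper
-- raises UnboundLocalError (no value is returned).
def lettersList : List Char :=
  ['a','b','c','d','e','f','g','h','i','j','k','l','m','n','o','p','q','r','s','t','u','v','w','x','y','z',
   'A','B','C','D','E','F','G','H','I','J','K','L','M','N','O','P','Q','R','S','T','U','V','W','X','Y','Z']
def Pre_one_uppercase (string : String) : Prop :=
  string.toList.all (fun c => lettersList.contains c) = true
instance (string : String) : Decidable (Pre_one_uppercase string) := by
  unfold Pre_one_uppercase; infer_instance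

def pvWitness_one_uppercase : String := "abC"

def Spec_one_uppercase (string : String) (out : List String) : Prop := out = one_uppercase_alt string
instance (string : String) (out : List String) : Decidable (Spec_one_uppercase string out) := by unfold Spec_one_uppercase; infer_instance

-- ===== CLAIM (what is proved, stated in full; the proofs are below) =====
def Claim_equal_one_uppercase : Prop := ∀ (string : String), Dom_one_uppercase string → Pre_one_uppercase string → Spec_one_uppercase string (one_uppercase string)

-- ===== LEMMAS AND PROOFS =====

-- on each of the 52 letters, A's dict scan returns exactly B's str.upper()
theorem uppercaseA_letter (c : Char) (h : c ∈ lettersList) :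
    uppercaseA c = some (upperB c) := by
  fin_cases h <;> decide

-- once i has passed num, the inner loop just copies the rest of the string
theorem pwrdGo_big (chars : List Char) (num i : Nat) (acc : List Char) (h : num < i) :
    pwrdGo chars num i acc = some (acc ++ chars) := by
  induction chars generalizing i acc with
  | nil => simp [pwrdGo]
  | cons x rest ih =>
    rw [pwrdGo, if_neg (by omega)]
    rw [ih (i + 1) (acc ++ [x]) (by omega)]
    simp

-- the inner loop, started at i with target i + k, k in range: copy k chars, uppercase one, copy the rest
theorem pwrdGo_spec (chars : List Char) (k i : Nat) (acc : List Char)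
    (hk : k < chars.length)
    (hL : ∀ c ∈ chars, c ∈ lettersList) :
    pwrdGo chars (i + k) i acc =
      some (acc ++ chars.take k ++ [upperB (chars.getD k ' ')] ++ chars.drop (k + 1)) := by
  induction chars generalizing k i acc with
  | nil => simp at hk
  | cons x rest ih =>
    cases k with
    | zero =>
      rw [pwrdGo, if_pos (by omega)]
      rw [uppercaseA_letter x (hL x (by simp))]
      simp only []
      rw [pwrdGo_big rest (i + 0) (i + 1) (acc ++ [upperB x]) (by omega)]
      simp
    | succ k' =>
      rw [pwrdGo, if_neg (by omega)]
      have : i + (k' + 1) = (i + 1) + k' := by omega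
      rw [this, ih k' (i + 1) (acc ++ [x]) (by simpa using hk)
            (fun c hc => hL c (by simp [hc]))]
      simp

theorem one_uppercase_spec : Claim_equal_one_uppercase := by
  intro string _ hpre
  unfold Pre_one_uppercase at hpre
  rw [List.all_eq_true] at hpre
  replace hpre : ∀ c ∈ string.toList, c ∈ lettersList :=
    fun c hc => List.contains_iff_mem.mp (hpre c hc)
  unfold Spec_one_uppercase one_uppercase one_uppercase_alt
  rw [PySem.List.foldl_append_singleton_eq_map]
  refine List.map_congr_left (fun i hi => ?_)
  have hlen : i < string.toList.length := List.mem_range.mp hi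
  have := pwrdGo_spec string.toList i 0 [] hlen hpre
  simp only [Nat.zero_add] at this
  rw [this]
  simp
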